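-- pv_equiv track=rewrite | github.com/rlpickett30/FLCEnviroPulse | scripts/main_interactive_sim_enviromental.py | split_hex_chunks
-- ===== SOURCE A (Python) =====
-- def split_hex_chunks(packed_hex, field_lengths):
--     """
--     Takes a hex string and a list of field lengths (in bytes),
--     returns a list of hex chunks corresponding to each field.
--     """
--     chunks = []
--     index = 0
--     for length in field_lengths:
--         hex_chars = length * 2  # 1 byte = 2 hex chars
--         chunk = packed_hex[index:index + hex_chars]
--         chunks.append(chunk)
--         index += hex_chars
--     return chunks
-- ===== SOURCE B (Python) =====
-- def split_hex_chunks(packed_hex, field_lengths):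
--     """Split a hex string into per-field chunks via precomputed cumulative offsets."""
--     offsets = [0]
--     for length in field_lengths:
--         offsets.append(offsets[-1] + length * 2)
--     return [packed_hex[a:b] for a, b in zip(offsets, offsets[1:])]
-- ===== Notes on version B (the rewrite author's own statement) =====
-- stated objective: alternative
-- what changed: B precomputes the list of cumulative character offsets in one pass and then produces each chunk by slicing between consecutive offset pairs, instead of A's single loop that maintains a running index while appending chunks.
import Mathlib
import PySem

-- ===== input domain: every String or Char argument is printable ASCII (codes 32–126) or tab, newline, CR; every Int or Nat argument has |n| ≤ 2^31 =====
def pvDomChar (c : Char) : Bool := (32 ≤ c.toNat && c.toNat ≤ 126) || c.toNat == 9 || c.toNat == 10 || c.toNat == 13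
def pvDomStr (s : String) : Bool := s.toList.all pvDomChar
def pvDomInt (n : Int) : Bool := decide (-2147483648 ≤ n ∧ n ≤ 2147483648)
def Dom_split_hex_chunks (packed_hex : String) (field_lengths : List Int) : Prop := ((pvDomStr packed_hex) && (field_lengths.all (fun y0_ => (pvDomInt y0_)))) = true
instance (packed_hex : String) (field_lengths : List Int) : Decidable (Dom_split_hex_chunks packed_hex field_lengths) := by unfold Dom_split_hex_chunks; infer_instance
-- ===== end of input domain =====

-- B precomputes cumulative character offsets, then slices between consecutive offset pairs
-- (alternative decomposition; A keeps a running index while appending chunks).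

-- ===== PORT A =====
-- A: loop over field_lengths with running index, appending packed_hex[index:index+length*2].
def split_hex_chunks (packed_hex : String) (field_lengths : List Int) : List String :=
  (field_lengths.foldl
    (fun (st : List String × Int) (length : Int) =>
      let hex_chars := length * 2
      let chunk := PySem.Str.slice packed_hex (some st.2) (some (st.2 + hex_chars))
      (st.1 ++ [chunk], st.2 + hex_chars))
    ([], 0)).1

-- ===== PORT B =====
-- B: first build the cumulative offsets list, then slice between consecutive pairs.
def split_hex_chunks_alt (packed_hex : String) (field_lengths : List Int) : List String :=
  let offsets : List Int :=
    field_lengths.foldl (fun acc length => acc ++ [acc.getLast! + length * 2]) [0]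
  (offsets.zip offsets.tail).map (fun p => PySem.Str.slice packed_hex (some p.1) (some p.2))

-- ===== PRECONDITION & SPEC =====
def Spec_split_hex_chunks (packed_hex : String) (field_lengths : List Int) (out : List String) : Prop := out = split_hex_chunks_alt packed_hex field_lengths
instance (packed_hex : String) (field_lengths : List Int) (out : List String) : Decidable (Spec_split_hex_chunks packed_hex field_lengths out) := by unfold Spec_split_hex_chunks; infer_instance

-- ===== CLAIM (what is proved, stated in full; the proofs are below) =====
def Claim_equal_split_hex_chunks : Prop := ∀ (packed_hex : String) (field_lengths : List Int), Dom_split_hex_chunks packed_hex field_lengths → Spec_split_hex_chunks packed_hex field_lengths (split_hex_chunks packed_hex field_lengths)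

-- ===== LEMMAS AND PROOFS =====

/-- Reference shape: the chunks produced starting at offset `i`. -/
def pvChunksFrom (s : String) (i : Int) : List Int → List String
  | [] => []
  | l :: ls => PySem.Str.slice s (some i) (some (i + l * 2)) :: pvChunksFrom s (i + l * 2) ls

/-- The tail of the cumulative-offsets list starting from offset `i`. -/
def pvOffsTail (i : Int) : List Int → List Int
  | [] => []
  | l :: ls => (i + l * 2) :: pvOffsTail (i + l * 2) ls

theorem pvGetLast!_concat (acc : List Int) (x : Int) : (acc ++ [x]).getLast! = x := by
  induction acc with
  | nil => rfl
  | cons a t _ =>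
      cases t with
      | nil => rfl
      | cons b t' => simp [List.getLast!]

theorem pvFoldA (s : String) (ls : List Int) :
    ∀ (acc : List String) (i : Int),
      (ls.foldl
        (fun (st : List String × Int) (length : Int) =>
          (st.1 ++ [PySem.Str.slice s (some st.2) (some (st.2 + length * 2))], st.2 + length * 2))
        (acc, i)).1 = acc ++ pvChunksFrom s i ls := by
  induction ls with
  | nil => intro acc i; simp [pvChunksFrom]
  | cons l ls ih =>
      intro acc i
      simp only [List.foldl_cons, pvChunksFrom]
      rw [ih]
      simp

theorem pvFoldOff (ls : List Int) :
    ∀ (acc : List Int) (i : Int),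
      (ls.foldl (fun acc length => acc ++ [acc.getLast! + length * 2]) (acc ++ [i]))
        = acc ++ i :: pvOffsTail i ls := by
  induction ls with
  | nil => intro acc i; simp [pvOffsTail]
  | cons l ls ih =>
      intro acc i
      simp only [List.foldl_cons, pvOffsTail, pvGetLast!_concat]
      have := ih (acc ++ [i]) (i + l * 2)
      simpa using this

theorem pvZipMap (s : String) (ls : List Int) :
    ∀ (i : Int),
      (((i :: pvOffsTail i ls).zip (pvOffsTail i ls)).map
        (fun p => PySem.Str.slice s (some p.1) (some p.2))) = pvChunksFrom s i ls := by
  induction ls with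
  | nil => intro i; simp [pvOffsTail, pvChunksFrom]
  | cons l ls ih =>
      intro i
      simp only [pvOffsTail, pvChunksFrom, List.zip_cons_cons, List.map_cons]
      exact congrArg _ (ih (i + l * 2))

-- ===== VERDICT (by name: the statement is the Claim_ definition above) =====
theorem split_hex_chunks_spec : Claim_equal_split_hex_chunks := by
  intro s ls _
  unfold Spec_split_hex_chunks split_hex_chunks split_hex_chunks_alt
  have hA := pvFoldA s ls [] 0
  have hOff := pvFoldOff ls [] 0
  simp only [List.nil_append] at hA hOff
  rw [hA, hOff]
  simpa [List.tail] using (pvZipMap s ls 0).symm
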